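-- pv_equiv track=rewrite | github.com/PttCodingMan/PTT_bots | 20字注音文.py | countEng
-- ===== SOURCE A (Python) =====
-- def countEng(input):
--     # isalpha
--     result = 0
--     LastCharInde = -1
--     for i in range(len(input)):
--         if LastCharInde != -1 and i <= LastCharInde:
--             continue
--
--         char = input[i]
--
--         ii = i
--         while char.isalpha():
--             LastCharInde = ii
--             ii += 1
--             if ii >= len(input):
--                 break
--             char = input[ii]
--         if i != ii:
--             result += 1
--
--     return result
-- ===== SOURCE B (Python) =====
-- def countEng(input):
--     # Single pass: count transitions from non-alphabetic (or start) to alphabetic.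
--     result = 0
--     prev = False
--     for ch in input:
--         cur = ch.isalpha()
--         if cur and not prev:
--             result += 1
--         prev = cur
--     return result
-- ===== Notes on version B (the rewrite author's own statement) =====
-- stated objective: simpler
-- what changed: Replaced the index loop with a skip-ahead inner while and LastCharInde bookkeeping by a single linear pass over the characters that counts non-alpha-to-alpha transitions with one boolean of state.
import Mathlib
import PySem

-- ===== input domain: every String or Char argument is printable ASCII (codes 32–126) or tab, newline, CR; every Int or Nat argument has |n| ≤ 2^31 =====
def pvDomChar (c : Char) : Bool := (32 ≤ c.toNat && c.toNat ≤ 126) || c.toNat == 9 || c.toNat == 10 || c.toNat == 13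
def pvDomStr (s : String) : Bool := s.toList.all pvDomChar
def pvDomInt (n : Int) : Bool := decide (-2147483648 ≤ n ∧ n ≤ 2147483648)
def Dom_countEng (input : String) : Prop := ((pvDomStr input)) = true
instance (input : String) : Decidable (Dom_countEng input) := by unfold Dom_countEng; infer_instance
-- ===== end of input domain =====

-- B replaces A's skip-ahead inner while loop and last-index bookkeeping by a single
-- linear pass counting non-alpha-to-alpha transitions; same O(n) cost, simpler.


-- ===== PORT A =====
-- inner `while char.isalpha(): …` loop; entered with ii = i < len, so checking the
-- bound before fetching s[ii] is exact (Python fetches s[i] first, then loops).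
-- Returns the pair (ii, LastCharInde) as left by the loop.
def pvWhileA (s : List Char) (ii : Nat) (last : Int) : Nat × Int :=
  if h : ii < s.length then
    if PySem.Chars.isalpha s[ii] then pvWhileA s (ii + 1) (ii : Int) else (ii, last)
  else (ii, last)
termination_by s.length - ii

-- one iteration of the `for i in range(len(input))` body; state = (result, LastCharInde)
def pvStepA (s : List Char) (st : Int × Int) (i : Nat) : Int × Int :=
  if st.2 ≠ -1 ∧ (i : Int) ≤ st.2 then st
  else
    let p := pvWhileA s i st.2
    (if i ≠ p.1 then st.1 + 1 else st.1, p.2)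

def countEng (input : String) : Int :=
  ((List.range input.toList.length).foldl (pvStepA input.toList) (0, -1)).1

-- ===== PORT B =====
-- one iteration of B's `for ch in input` body; state = (result, prev)
def pvStepB (st : Int × Bool) (c : Char) : Int × Bool :=
  let cur := PySem.Chars.isalpha c
  (if cur && !st.2 then st.1 + 1 else st.1, cur)

def countEng_alt (input : String) : Int :=
  (input.toList.foldl pvStepB (0, false)).1

-- ===== PRECONDITION & SPEC =====
def Spec_countEng (input : String) (out : Int) : Prop := out = countEng_alt input
instance (input : String) (out : Int) : Decidable (Spec_countEng input out) := by unfold Spec_countEng; infer_instance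

-- ===== CLAIM (what is proved, stated in full; the proofs are below) =====
def Claim_equal_countEng : Prop := ∀ (input : String), Dom_countEng input → Spec_countEng input (countEng input)

-- ===== LEMMAS AND PROOFS =====

-- number of maximal runs of alphabetic characters in a list
def pvCnt : List Char → Int
  | [] => 0
  | c :: t =>
    if PySem.Chars.isalpha c then 1 + pvCnt (t.dropWhile PySem.Chars.isalpha)
    else pvCnt t
termination_by l => l.length
decreasing_by
  all_goals simp only [List.length_cons]
  · exact Nat.lt_succ_of_le (List.length_dropWhile_le _ _)
  · omega

theorem pv_dropWhile_eq_drop (p : Char → Bool) (l : List Char) :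
    l.dropWhile p = l.drop (l.takeWhile p).length := by
  induction l with
  | nil => simp
  | cons c t ih =>
    by_cases h : p c <;> simp [h, ih]

-- B's fold computes r + (runs remaining, given whether we are inside a run)
theorem pv_foldB (l : List Char) (r : Int) (prev : Bool) :
    (l.foldl pvStepB (r, prev)).1 =
      r + (if prev then pvCnt (l.dropWhile PySem.Chars.isalpha) else pvCnt l) := by
  induction l generalizing r prev with
  | nil => cases prev <;> simp [pvCnt]
  | cons c t ih =>
    by_cases h : PySem.Chars.isalpha c = true
    · cases prev with
      | false =>
        simp only [List.foldl_cons, pvStepB, h]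
        rw [ih]
        simp only [Bool.not_false, Bool.true_and, if_true]
        simp [pvCnt, h]
        ring
      | true =>
        simp only [List.foldl_cons, pvStepB, h]
        rw [ih]
        simp [h]
    · have hb : PySem.Chars.isalpha c = false := by simpa using h
      cases prev <;>
        · simp only [List.foldl_cons, pvStepB, hb, Bool.false_and, Bool.false_eq_true,
            if_false]
          rw [ih]
          simp [pvCnt, hb]

-- characterisation of the inner while loop: it advances past the alpha run at i
theorem pv_whileA_eq (s : List Char) (i : Nat) (last : Int) :
    pvWhileA s i last =
      (i + ((s.drop i).takeWhile PySem.Chars.isalpha).length,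
       if ((s.drop i).takeWhile PySem.Chars.isalpha).length = 0 then last
       else ((i : Int) + ((s.drop i).takeWhile PySem.Chars.isalpha).length - 1)) := by
  by_cases h : i < s.length
  · have hd : s.drop i = s[i] :: s.drop (i + 1) := (List.getElem_cons_drop h).symm
    by_cases ha : PySem.Chars.isalpha s[i] = true
    · have ih := pv_whileA_eq s (i + 1) (i : Int)
      have hlen : ((s.drop i).takeWhile PySem.Chars.isalpha).length =
          ((s.drop (i + 1)).takeWhile PySem.Chars.isalpha).length + 1 := by
        conv_lhs => rw [hd]
        rw [List.takeWhile_cons, if_pos ha, List.length_cons]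
      rw [pvWhileA, dif_pos h, if_pos ha, ih, hlen]
      simp only [Prod.mk.injEq]
      constructor
      · omega
      · rw [if_neg (Nat.succ_ne_zero _)]
        by_cases hz : ((s.drop (i + 1)).takeWhile PySem.Chars.isalpha).length = 0
        · rw [if_pos hz, hz]; push_cast; omega
        · rw [if_neg hz]; push_cast; omega
    · have hb : PySem.Chars.isalpha s[i] = false := by simpa using ha
      have hlen : ((s.drop i).takeWhile PySem.Chars.isalpha).length = 0 := by
        conv_lhs => rw [hd]
        rw [List.takeWhile_cons, if_neg (by simp [hb]), List.length_nil]
      rw [pvWhileA, dif_pos h, if_neg ha, hlen]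
      simp
  · have hnil : s.drop i = [] := List.drop_eq_nil_of_le (by omega)
    rw [pvWhileA, dif_neg h, hnil]
    simp
termination_by s.length - i

-- skipped indices (i' ≤ LastCharInde) leave the state unchanged
theorem pv_skip (s : List Char) (m j : Nat) (r last : Int) (h0 : 0 ≤ last)
    (hm : (j : Int) + m ≤ last + 1) :
    (List.range' j m).foldl (pvStepA s) (r, last) = (r, last) := by
  induction m generalizing j with
  | zero => simp
  | succ m ih =>
    have hstep : pvStepA s (r, last) j = (r, last) := by
      rw [pvStepA, if_pos]
      exact ⟨by omega, by omega⟩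
    rw [List.range'_succ, List.foldl_cons, hstep]
    exact ih (j + 1) (by omega)

-- main invariant for A's outer loop
theorem pv_main (n : Nat) : ∀ (s : List Char) (i : Nat) (r last : Int),
    n = s.length - i → last < (i : Int) →
    ((List.range' i n).foldl (pvStepA s) (r, last)).1 = r + pvCnt (s.drop i) := by
  induction n using Nat.strong_induction_on with
  | _ n IH =>
    intro s i r last hn hlast
    by_cases hi : i < s.length
    · have hd : s.drop i = s[i] :: s.drop (i + 1) := (List.getElem_cons_drop hi).symm
      obtain ⟨m, rfl⟩ : ∃ m, n = m + 1 := ⟨n - 1, by omega⟩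
      rw [List.range'_succ, List.foldl_cons]
      have hstep0 : pvStepA s (r, last) i =
          (if i ≠ (pvWhileA s i last).1 then r + 1 else r, (pvWhileA s i last).2) := by
        rw [pvStepA, if_neg]
        rintro ⟨h1, h2⟩; omega
      set k := ((s.drop i).takeWhile PySem.Chars.isalpha).length with hk
      have hkle : k ≤ s.length - i := by
        have h1 := (List.takeWhile_sublist (l := s.drop i) PySem.Chars.isalpha).length_le
        rw [List.length_drop] at h1
        omega
      by_cases hz : k = 0
      · -- s[i] not alphabetic: no progress at i
        have hna : PySem.Chars.isalpha s[i] = false := by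
          by_contra hc
          rw [hd, List.takeWhile_cons, if_pos (by simpa using hc)] at hk
          simp at hk; omega
        rw [hstep0, pv_whileA_eq, ← hk, if_pos hz,
          if_neg (show ¬ i ≠ i + k by omega)]
        rw [IH m (by omega) s (i + 1) r last (by omega) (by omega)]
        have hrhs : pvCnt (s.drop i) = pvCnt (s.drop (i + 1)) := by
          conv_lhs => rw [hd]
          simp only [pvCnt]
          rw [hna, if_neg (by simp)]
        rw [hrhs]
      · -- s[i] starts an alphabetic run of length k
        have hka : PySem.Chars.isalpha s[i] = true := by
          by_contra hc
          rw [hd, List.takeWhile_cons, if_neg (by simpa using hc)] at hk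
          simp at hk
          omega
        rw [hstep0, pv_whileA_eq, ← hk, if_neg hz,
          if_pos (show i ≠ i + k by omega)]
        have hsplit : List.range' (i + 1) m =
            List.range' (i + 1) (k - 1) ++ List.range' (i + k) (m - (k - 1)) := by
          have h2 : (i + 1) + 1 * (k - 1) = i + k := by omega
          rw [← h2, List.range'_append]
          congr 1; omega
        rw [hsplit, List.foldl_append,
          pv_skip s (k - 1) (i + 1) (r + 1) ((i : Int) + k - 1) (by omega) (by omega),
          IH (m - (k - 1)) (by omega) s (i + k) (r + 1) ((i : Int) + k - 1)
            (by omega) (by omega)]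
        have hdrop : (s.drop (i + 1)).dropWhile PySem.Chars.isalpha = s.drop (i + k) := by
          have htk : ((s.drop (i + 1)).takeWhile PySem.Chars.isalpha).length = k - 1 := by
            rw [hd, List.takeWhile_cons, if_pos hka] at hk
            simp at hk; omega
          rw [pv_dropWhile_eq_drop, htk, List.drop_drop]
          congr 1; omega
        have hrhs : pvCnt (s.drop i) = 1 + pvCnt (s.drop (i + k)) := by
          conv_lhs => rw [hd]
          simp only [pvCnt]
          rw [hka, if_pos rfl, hdrop]
        rw [hrhs]
        ring
    · have hz : n = 0 := by omega
      subst hz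
      have hnil : s.drop i = [] := List.drop_eq_nil_of_le (by omega)
      simp [hnil, pvCnt]

-- ===== VERDICT (by name: the statement is the Claim_ definition above) =====
theorem countEng_spec : Claim_equal_countEng := by
  intro input _
  unfold Spec_countEng countEng countEng_alt
  rw [List.range_eq_range',
    pv_main input.toList.length input.toList 0 0 (-1) (by omega) (by omega),
    pv_foldB input.toList 0 false]
  simp
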